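-- pv_equiv track=rewrite | github.com/plural-reality/fujishi_ippannkaikei_yosansho | budget_cell/trend.py | _advance_path
-- ===== SOURCE A (Python) =====
-- def _advance_path(
--     previous: tuple[str, ...],
--     level: int,
--     name: str,
-- ) -> tuple[str, ...]:
--     size = max(len(previous), level)
--     padded = tuple(
--         previous[idx] if idx < len(previous) else ""
--         for idx in range(size)
--     )
--     return tuple(
--         name if idx == level - 1 else padded[idx] if idx < level - 1 else ""
--         for idx in range(size)
--     )
-- ===== SOURCE B (Python) =====
-- def _advance_path(
--     previous: tuple[str, ...],
--     level: int,
--     name: str,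
-- ) -> tuple[str, ...]:
--     if level <= 0:
--         return ("",) * len(previous)
--     keep = previous[:level - 1]
--     path = keep + ("",) * (level - 1 - len(keep)) + (name,)
--     return path + ("",) * (len(previous) - len(path))
-- ===== Notes on version B (the rewrite author's own statement) =====
-- stated objective: simpler
-- what changed: Replaces A's two index-driven map passes (padded tuple, then a triple-branch comprehension over range(size)) with slice-and-concatenate: early-return all blanks for level<=0, else glue previous[:level-1] + blank padding + (name,) + trailing blanks; no per-index branching at all.
import Mathlib
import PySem

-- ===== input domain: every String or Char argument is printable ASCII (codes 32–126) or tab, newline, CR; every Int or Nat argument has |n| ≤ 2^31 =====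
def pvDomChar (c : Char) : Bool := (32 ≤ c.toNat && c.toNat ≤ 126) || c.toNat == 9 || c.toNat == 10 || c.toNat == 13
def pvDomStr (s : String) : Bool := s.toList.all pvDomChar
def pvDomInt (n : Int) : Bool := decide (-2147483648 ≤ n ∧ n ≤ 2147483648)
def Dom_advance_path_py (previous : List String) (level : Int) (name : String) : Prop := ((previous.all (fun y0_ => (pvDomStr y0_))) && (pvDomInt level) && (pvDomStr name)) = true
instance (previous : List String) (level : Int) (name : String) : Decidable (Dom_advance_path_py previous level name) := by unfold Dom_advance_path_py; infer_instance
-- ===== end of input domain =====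

-- B replaces A's two index-driven map passes by slice-and-concatenate
-- (previous[:level-1] ++ blanks ++ [name] ++ trailing blanks): simpler.

-- ===== PORT A =====
-- previous[idx] is guarded by 0 ≤ idx (range) and idx < len(previous), so the
-- pyGetD default "" is never used.
def advance_path_py (previous : List String) (level : Int) (name : String) : List String :=
  let size : Int := max (previous.length : Int) level
  let padded : List String := (PySem.List.pyRange 0 size 1).map (fun idx =>
    if idx < (previous.length : Int) then PySem.List.pyGetD previous idx "" else "")
  (PySem.List.pyRange 0 size 1).map (fun idx =>
    if idx = level - 1 then name
    else if idx < level - 1 then PySem.List.pyGetD padded idx "" else "")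

-- ===== PORT B =====
-- ("",) * n with possibly negative n is the empty tuple, matching Int.toNat's
-- truncation in the replicate counts.
def advance_path_py_alt (previous : List String) (level : Int) (name : String) : List String :=
  if level ≤ 0 then List.replicate previous.length ""
  else
    let keep := PySem.List.slice previous none (some (level - 1))
    let path := keep ++ List.replicate (level - 1 - (keep.length : Int)).toNat "" ++ [name]
    path ++ List.replicate ((previous.length : Int) - (path.length : Int)).toNat ""

-- ===== PRECONDITION & SPEC =====
def Spec_advance_path_py (previous : List String) (level : Int) (name : String) (out : List String) : Prop := out = advance_path_py_alt previous level name
instance (previous : List String) (level : Int) (name : String) (out : List String) : Decidable (Spec_advance_path_py previous level name out) := by unfold Spec_advance_path_py; infer_instance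

-- ===== CLAIM (what is proved, stated in full; the proofs are below) =====
def Claim_equal_advance_path_py : Prop := ∀ (previous : List String) (level : Int) (name : String), Dom_advance_path_py previous level name → Spec_advance_path_py previous level name (advance_path_py previous level name)

-- ===== LEMMAS AND PROOFS =====

theorem advance_path_py_eq (previous : List String) (level : Int) (name : String) :
    advance_path_py previous level name = advance_path_py_alt previous level name := by
  unfold advance_path_py advance_path_py_alt
  simp only []
  by_cases hlev : level ≤ 0
  · rw [if_pos hlev]
    have hsz : max (previous.length : Int) level = (previous.length : Int) := by
      have : (0:Int) ≤ previous.length := by positivity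
      omega
    rw [hsz]
    apply List.ext_getElem?
    intro i
    rw [List.getElem?_replicate]
    by_cases hi : i < previous.length
    · rw [List.getElem?_eq_getElem (by rw [List.length_map, PySem.List.length_pyRange_one]; omega),
        List.getElem_map, PySem.List.getElem_pyRange_one]
      simp only [zero_add]
      rw [if_neg (by omega), if_neg (by omega), if_pos hi]
    · rw [if_neg hi, List.getElem?_eq_none (by rw [List.length_map, PySem.List.length_pyRange_one]; omega)]
  · rw [if_neg hlev]
    have hk : level - 1 = (((level - 1).toNat : Nat) : Int) := by omega
    set k : Nat := (level - 1).toNat with hkdef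
    set L : Nat := previous.length with hL
    have hkeep : PySem.List.slice previous none (some (level - 1)) = previous.take k := by
      rw [hk]; exact PySem.List.slice_to_natCast previous k
    rw [hkeep]
    have hkeeplen : (previous.take k).length = min k L := by simp [hL]
    have hrep1 : ((level - 1 - ((previous.take k).length : Int)).toNat) = k - min k L := by
      rw [hkeeplen]; omega
    have hpathlen : (previous.take k ++ List.replicate (k - min k L) "" ++ [name]).length = k + 1 := by
      simp only [List.length_append, hkeeplen, List.length_replicate, List.length_singleton]; omega
    rw [hrep1]
    have hrep2 : (((L : Int)) - (((previous.take k ++ List.replicate (k - min k L) "" ++ [name]).length : Nat) : Int)).toNat = L - (k+1) := by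
      rw [hpathlen]; omega
    rw [hrep2]
    apply List.ext_getElem?
    intro i
    have hsizeN : ((max (L:Int) level - 0).toNat) = max L (k+1) := by omega
    by_cases hi : i < max L (k+1)
    · rw [List.getElem?_eq_getElem (by rw [List.length_map, PySem.List.length_pyRange_one, hsizeN]; omega),
        List.getElem_map, PySem.List.getElem_pyRange_one]
      simp only [zero_add]
      by_cases hik : (i:Int) = level - 1
      · rw [if_pos hik]
        have hie : i = k := by omega
        subst hie
        simp only [List.getElem?_append, List.length_append, hkeeplen, List.length_replicate,
          List.length_singleton, List.getElem?_replicate, List.getElem?_take, List.getElem?_singleton]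
        split_ifs <;> first | rfl | omega
      · rw [if_neg hik]
        by_cases hlt : (i:Int) < level - 1
        · rw [if_pos hlt,
            PySem.List.pyGetD_map_pyRange_of_nonneg _ _ _ _ (by omega) (by omega)]
          simp only [PySem.List.pyGetD_natCast, List.getElem?_append, List.length_append, hkeeplen,
            List.length_replicate, List.length_singleton, List.getElem?_replicate,
            List.getElem?_take, List.getElem?_singleton, List.getD_eq_getElem?_getD]
          split_ifs <;>
            first
              | rfl
              | omega
              | (rw [List.getElem?_eq_getElem (show i < previous.length by omega)]; rfl)
        · rw [if_neg hlt]
          simp only [List.getElem?_append, List.length_append, hkeeplen, List.length_replicate,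
            List.length_singleton, List.getElem?_replicate, List.getElem?_take,
            List.getElem?_singleton]
          split_ifs <;> first | rfl | omega
    · rw [List.getElem?_eq_none (by rw [List.length_map, PySem.List.length_pyRange_one, hsizeN]; omega),
        List.getElem?_eq_none (by
          simp only [List.length_append, hkeeplen, List.length_replicate, List.length_singleton]
          omega)]

-- ===== VERDICT (by name: the statement is the Claim_ definition above) =====
theorem advance_path_py_spec : Claim_equal_advance_path_py := by
  intro previous level name _
  exact advance_path_py_eq previous level name
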